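-- pv_equiv track=rewrite | github.com/Cimball1334/OriamPortfolio | GMUCS/CS112/pa7/ckimbal4_233_pa7.py | swap_chars
-- ===== SOURCE A (Python) =====
-- def swap_chars(str1, str2, n):
--     #i approached the problem by segmenting the strings into section of n length:
--
--     #if section with n length is possible
--     if (len(str1) >= n and len(str2) >= n):
--         #stores a character that will be overwritten
--         chr1 = str1[n-1]
--         #saves the tuple here for only one recursive call
--         #recursive call that shortens the strings by n
--         tpl = swap_chars(str1[n:],str2[n:],n)
--         #substringing to swap character
--         str1 = str1[:n-1] + str2[n-1] + tpl[0]
--         #substringing to swap character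
--         str2 = str2[:n-1] + chr1 +tpl[1]
--         #return tuple of new strings
--         return (str1,str2)
--     #return tuple of re-ordered strings
--     return (str1,str2)
-- ===== SOURCE B (Python) =====
-- def swap_chars(str1, str2, n):
--     # single pass: swap the characters at positions n-1, 2n-1, ... in place
--     a, b = list(str1), list(str2)
--     i = n - 1
--     while i < len(a) and i < len(b):
--         a[i], b[i] = b[i], a[i]
--         i += n
--     return (''.join(a), ''.join(b))
-- ===== Notes on version B (the rewrite author's own statement) =====
-- stated objective: simpler
-- what changed: replaces the recursion that re-slices and re-concatenates both strings at every block with a single flat loop over char lists that swaps in place at positions n-1, 2n-1, ...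
import Mathlib
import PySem

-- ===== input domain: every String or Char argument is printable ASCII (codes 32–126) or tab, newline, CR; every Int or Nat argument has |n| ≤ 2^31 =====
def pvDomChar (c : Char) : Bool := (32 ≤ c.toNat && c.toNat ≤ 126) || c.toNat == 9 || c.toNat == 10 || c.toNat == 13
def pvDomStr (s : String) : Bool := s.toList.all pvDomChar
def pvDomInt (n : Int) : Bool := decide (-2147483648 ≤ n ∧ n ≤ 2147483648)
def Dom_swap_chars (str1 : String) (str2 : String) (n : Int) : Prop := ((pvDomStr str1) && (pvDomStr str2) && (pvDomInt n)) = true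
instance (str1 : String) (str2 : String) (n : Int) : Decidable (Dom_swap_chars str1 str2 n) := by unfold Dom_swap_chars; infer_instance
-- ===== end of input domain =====

-- B replaces A's recursive re-slicing with one linear in-place pass; proved equal for n ≥ 1
-- (A raises RecursionError/IndexError for n ≤ 0, excluded by Pre_).

-- ===== PORT A =====
-- fuel-totalised recursion (str1 shrinks by n ≥ 1 per call inside Pre_); none = exception
def swapCharsA (fuel : Nat) (s1 s2 : List Char) (n : Int) : Option (List Char × List Char) :=
  match fuel with
  | 0 => none
  | f + 1 =>
    if (n ≤ (s1.length : Int) ∧ n ≤ (s2.length : Int)) then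
      match PySem.List.pyGet? s1 (n - 1), PySem.List.pyGet? s2 (n - 1) with
      | some chr1, some c2 =>
        match swapCharsA f (PySem.List.slice s1 (some n) none) (PySem.List.slice s2 (some n) none) n with
        | some tpl =>
          some (PySem.List.slice s1 none (some (n - 1)) ++ [c2] ++ tpl.1,
                PySem.List.slice s2 none (some (n - 1)) ++ [chr1] ++ tpl.2)
        | none => none
      | _, _ => none
    else
      some (s1, s2)

def swap_chars (str1 : String) (str2 : String) (n : Int) : String × String :=
  match swapCharsA (str1.toList.length + 1) str1.toList str2.toList n with
  | some r => (String.mk r.1, String.mk r.2)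
  | none => ("", "")  -- unreachable inside Pre_ (Python raises there)

-- ===== PORT B =====
-- the while loop; it runs at most len(a) times inside Pre_, hence the fuel
def swapB (fuel : Nat) (a b : List Char) (i n : Int) : List Char × List Char :=
  match fuel with
  | 0 => (a, b)
  | f + 1 =>
    if (i < (a.length : Int) ∧ i < (b.length : Int)) then
      match PySem.List.pyGet? a i, PySem.List.pyGet? b i with
      | some ca, some cb =>
        swapB f (PySem.List.pySetD a i cb) (PySem.List.pySetD b i ca) (i + n) n
      | _, _ => (a, b)
    else (a, b)

def swap_chars_alt (str1 : String) (str2 : String) (n : Int) : String × String :=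
  let r := swapB (str1.toList.length + 1) str1.toList str2.toList (n - 1) n
  (String.mk r.1, String.mk r.2)

-- ===== PRECONDITION & SPEC =====
-- Pre_ excludes n ≤ 0, where Python A never returns (RecursionError, or IndexError from a
-- negative index) and Python B loops forever.
def Pre_swap_chars (str1 : String) (str2 : String) (n : Int) : Prop := 1 ≤ n
instance (str1 : String) (str2 : String) (n : Int) : Decidable (Pre_swap_chars str1 str2 n) := by unfold Pre_swap_chars; infer_instance
def pvWitness_swap_chars : String × String × Int := ("abcdef", "uvwxyz", 2)

def Spec_swap_chars (str1 : String) (str2 : String) (n : Int) (out : String × String) : Prop := out = swap_chars_alt str1 str2 n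
instance (str1 : String) (str2 : String) (n : Int) (out : String × String) : Decidable (Spec_swap_chars str1 str2 n out) := by unfold Spec_swap_chars; infer_instance

-- ===== CLAIM (what is proved, stated in full; the proofs are below) =====
def Claim_equal_swap_chars : Prop := ∀ (str1 : String) (str2 : String) (n : Int), Dom_swap_chars str1 str2 n → Pre_swap_chars str1 str2 n → Spec_swap_chars str1 str2 n (swap_chars str1 str2 n)

-- ===== LEMMAS AND PROOFS =====

-- shift: once the loop index has passed a common prefix, the prefix is inert
lemma swapB_shift (f : Nat) : ∀ (p a q b : List Char) (i n : Int),
    p.length = q.length → (p.length : Int) ≤ i → 1 ≤ n →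
    swapB f (p ++ a) (q ++ b) i n =
      ((p ++ (swapB f a b (i - p.length) n).1), (q ++ (swapB f a b (i - p.length) n).2)) := by
  induction f with
  | zero => intro p a q b i n hpq hpi hn; simp [swapB]
  | succ f ih =>
    intro p a q b i n hpq hpi hn
    have hm0 : (0:Int) ≤ (p.length:Int) := by positivity
    have hi0 : (0:Int) ≤ i := le_trans hm0 hpi
    have hnat : p.length ≤ i.toNat := by omega
    have hqnat : q.length ≤ i.toNat := by omega
    by_cases hc : i - (p.length:Int) < (a.length:Int) ∧ i - (p.length:Int) < (b.length:Int)
    · have hca : i < ((p ++ a).length : Int) := by simp; omega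
      have hcb : i < ((q ++ b).length : Int) := by simp; omega
      have hka : i.toNat - p.length < a.length := by omega
      have hkb : i.toNat - q.length < b.length := by omega
      have hga : PySem.List.pyGet? (p ++ a) i = some (a[i.toNat - p.length]) := by
        rw [PySem.List.pyGet?_of_nonneg _ hi0, List.getElem?_append_right hnat,
          List.getElem?_eq_getElem hka]
      have hgb : PySem.List.pyGet? (q ++ b) i = some (b[i.toNat - q.length]) := by
        rw [PySem.List.pyGet?_of_nonneg _ hi0, List.getElem?_append_right hqnat,
          List.getElem?_eq_getElem hkb]
      have hga' : PySem.List.pyGet? a (i - (p.length:Int)) = some (a[i.toNat - p.length]) := by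
        rw [PySem.List.pyGet?_of_nonneg _ (by omega), ← List.getElem?_eq_getElem hka]
        congr 1; omega
      have hgb' : PySem.List.pyGet? b (i - (p.length:Int)) = some (b[i.toNat - q.length]) := by
        rw [PySem.List.pyGet?_of_nonneg _ (by omega), ← List.getElem?_eq_getElem hkb]
        congr 2; omega
      have hsa : PySem.List.pySetD (p ++ a) i (b[i.toNat - q.length]) =
          p ++ a.set (i.toNat - p.length) (b[i.toNat - q.length]) := by
        rw [PySem.List.pySetD_of_nonneg _ _ hi0, List.set_append, if_neg (by omega)]
      have hsb : PySem.List.pySetD (q ++ b) i (a[i.toNat - p.length]) =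
          q ++ b.set (i.toNat - q.length) (a[i.toNat - p.length]) := by
        rw [PySem.List.pySetD_of_nonneg _ _ hi0, List.set_append, if_neg (by omega)]
      have hsa' : PySem.List.pySetD a (i - (p.length:Int)) (b[i.toNat - q.length]) =
          a.set (i.toNat - p.length) (b[i.toNat - q.length]) := by
        rw [PySem.List.pySetD_of_nonneg _ _ (by omega)]; congr 1; omega
      have hsb' : PySem.List.pySetD b (i - (p.length:Int)) (a[i.toNat - p.length]) =
          b.set (i.toNat - q.length) (a[i.toNat - p.length]) := by
        rw [PySem.List.pySetD_of_nonneg _ _ (by omega)]; congr 1; omega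
      rw [swapB, if_pos ⟨hca, hcb⟩, hga, hgb]
      conv_rhs => rw [swapB, if_pos ⟨hc.1, hc.2⟩, hga', hgb']
      dsimp only
      rw [hsa, hsb, hsa', hsb']
      have := ih p (a.set (i.toNat - p.length) (b[i.toNat - q.length]))
        q (b.set (i.toNat - q.length) (a[i.toNat - p.length])) (i + n) n hpq (by omega) hn
      rw [this]
      congr 2 <;> (congr 2; omega)
    · have hca : ¬ (i < ((p ++ a).length : Int) ∧ i < ((q ++ b).length : Int)) := by
        simp only [List.length_append]; push_cast; omega
      rw [swapB, if_neg hca]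
      conv_rhs => rw [swapB, if_neg hc]
-- main invariant: A's recursion equals B's loop started at index n-1
lemma swapCharsA_eq_swapB (f : Nat) : ∀ (a b : List Char) (n : Int),
    1 ≤ n → a.length < f →
    swapCharsA f a b n = some (swapB f a b (n - 1) n) := by
  induction f with
  | zero => intro a b n hn hf; omega
  | succ f ih =>
    intro a b n hn hf
    by_cases hc : n ≤ (a.length:Int) ∧ n ≤ (b.length:Int)
    · have hna : (n-1).toNat < a.length := by omega
      have hnb : (n-1).toNat < b.length := by omega
      have hga : PySem.List.pyGet? a (n - 1) = some (a[(n-1).toNat]) := by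
        rw [PySem.List.pyGet?_of_nonneg _ (by omega), List.getElem?_eq_getElem hna]
      have hgb : PySem.List.pyGet? b (n - 1) = some (b[(n-1).toNat]) := by
        rw [PySem.List.pyGet?_of_nonneg _ (by omega), List.getElem?_eq_getElem hnb]
      have hsl1 : PySem.List.slice a (some n) none = a.drop n.toNat :=
        PySem.List.slice_from _ (by omega)
      have hsl2 : PySem.List.slice b (some n) none = b.drop n.toNat :=
        PySem.List.slice_from _ (by omega)
      have hsl3 : PySem.List.slice a none (some (n-1)) = a.take (n-1).toNat :=
        PySem.List.slice_to _ (by omega)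
      have hsl4 : PySem.List.slice b none (some (n-1)) = b.take (n-1).toNat :=
        PySem.List.slice_to _ (by omega)
      have hrec := ih (a.drop n.toNat) (b.drop n.toNat) n hn (by simp; omega)
      rw [swapCharsA, if_pos hc, hga, hgb, hsl1, hsl2, hsl3, hsl4, hrec]
      -- now compute B's first step
      have hca : n - 1 < ((a.length:Int)) ∧ n - 1 < ((b.length:Int)) := by omega
      have hsa : PySem.List.pySetD a (n-1) (b[(n-1).toNat]) =
          (a.take (n-1).toNat ++ [b[(n-1).toNat]]) ++ a.drop n.toNat := by
        rw [PySem.List.pySetD_of_nonneg _ _ (by omega),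
          List.set_eq_take_append_cons_drop, if_pos hna]
        rw [show (n-1).toNat + 1 = n.toNat by omega]
        simp
      have hsb : PySem.List.pySetD b (n-1) (a[(n-1).toNat]) =
          (b.take (n-1).toNat ++ [a[(n-1).toNat]]) ++ b.drop n.toNat := by
        rw [PySem.List.pySetD_of_nonneg _ _ (by omega),
          List.set_eq_take_append_cons_drop, if_pos hnb]
        rw [show (n-1).toNat + 1 = n.toNat by omega]
        simp
      conv_rhs => rw [swapB, if_pos hca, hga, hgb]
      dsimp only
      rw [hsa, hsb]
      have hlen : (a.take (n-1).toNat ++ [b[(n-1).toNat]]).length =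
          (b.take (n-1).toNat ++ [a[(n-1).toNat]]).length := by simp; omega
      have hlen1 : ((a.take (n-1).toNat ++ [b[(n-1).toNat]]).length : Int) ≤ n - 1 + n := by
        simp; push_cast; omega
      rw [swapB_shift f _ _ _ _ _ _ hlen hlen1 hn]
      have harg : n - 1 + n - ((a.take (n-1).toNat ++ [b[(n-1).toNat]]).length : Int) = n - 1 := by
        simp; push_cast; omega
      rw [harg]
    · have hcb : ¬ (n - 1 < ((a.length:Int)) ∧ n - 1 < ((b.length:Int))) := by omega
      rw [swapCharsA, if_neg hc]
      conv_rhs => rw [swapB, if_neg hcb]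

-- ===== VERDICT (by name: the statement is the Claim_ definition above) =====
theorem swap_chars_spec : Claim_equal_swap_chars := by
  intro str1 str2 n _ hpre
  unfold Spec_swap_chars swap_chars swap_chars_alt
  rw [swapCharsA_eq_swapB (str1.toList.length + 1) str1.toList str2.toList n hpre (by omega)]
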